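-- pv_equiv track=rewrite | github.com/siyun319/Sokoban-Undergraduate-Project | level_generation.py | ranking_2
-- ===== SOURCE A (Python) =====
-- def ranking_2(sol):
--     last_char = None
--     # current_char = None
--
--     i = 0
--     for each in sol:
--         if each.isupper():
--             last_char = each
--             break
--         else:
--             i = i + 1
--
--     changes = 0
--     for j in range(i + 1, len(sol)):
--         if sol[j].isupper() and sol[j] != last_char:
--             last_char = sol[j]
--             changes = changes + 1
--
--     return changes
-- ===== SOURCE B (Python) =====
-- def ranking_2(sol):
--     ups = [c for c in sol if c.isupper()]
--     return sum(1 for a, b in zip(ups, ups[1:]) if a != b)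
-- ===== Notes on version B (the rewrite author's own statement) =====
-- stated objective: simpler
-- what changed: Replaces A's two index-tracking loops (explicit search for the first uppercase char with a counter, then an index loop carrying a mutable last_char) with a materialized uppercase subsequence and a single adjacent-pair pass over zip(ups, ups[1:]).
import Mathlib
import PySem

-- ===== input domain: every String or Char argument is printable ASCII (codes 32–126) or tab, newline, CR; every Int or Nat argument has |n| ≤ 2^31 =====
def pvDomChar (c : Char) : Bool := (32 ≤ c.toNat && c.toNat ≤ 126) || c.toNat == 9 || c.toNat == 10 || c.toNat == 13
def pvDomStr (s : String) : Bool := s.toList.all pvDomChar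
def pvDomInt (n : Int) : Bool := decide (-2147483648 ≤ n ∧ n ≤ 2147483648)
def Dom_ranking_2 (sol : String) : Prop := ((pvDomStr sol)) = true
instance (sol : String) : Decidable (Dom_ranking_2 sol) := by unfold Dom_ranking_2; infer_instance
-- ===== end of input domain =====

-- B replaces A's first-uppercase index search and running last_char with a materialized
-- uppercase subsequence plus one adjacent-pair pass (objective: simpler).

-- ===== PORT A =====
-- first loop of A: walk the string, counting i, stopping at the first uppercase char
def pvFirstUpper : List Char → Int → Option Char × Int
  | [], i => (none, i)
  | c :: cs, i =>
    if PySem.Chars.isupper c then (some c, i) else pvFirstUpper cs (i + 1)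

-- body of A's second loop, on the state (last_char, changes)
def pvStepA (st : Option Char × Int) (c : Char) : Option Char × Int :=
  if PySem.Chars.isupper c = true ∧ st.1 ≠ some c then (some c, st.2 + 1) else st

def ranking_2 (sol : String) : Int :=
  let cs := sol.toList
  let p := pvFirstUpper cs 0
  ((PySem.List.pyRange (p.2 + 1) (cs.length : Int) 1).foldl
      (fun st j => pvStepA st (PySem.List.pyGetD cs j ' ')) (p.1, 0)).2

-- ===== PORT B =====
def ranking_2_alt (sol : String) : Int :=
  let ups := sol.toList.filter (fun c => PySem.Chars.isupper c)
  -- zip(ups, ups[1:]) ; ups[1:] on a fresh list is its tail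
  (ups.zip (ups.drop 1)).foldl (fun acc p => if p.1 ≠ p.2 then acc + 1 else acc) 0

-- ===== PRECONDITION & SPEC =====
def Spec_ranking_2 (sol : String) (out : Int) : Prop := out = ranking_2_alt sol
instance (sol : String) (out : Int) : Decidable (Spec_ranking_2 sol out) := by unfold Spec_ranking_2; infer_instance

-- ===== CLAIM (what is proved, stated in full; the proofs are below) =====
def Claim_equal_ranking_2 : Prop := ∀ (sol : String), Dom_ranking_2 sol → Spec_ranking_2 sol (ranking_2 sol)

-- ===== LEMMAS AND PROOFS =====

-- number of adjacent differing pairs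
def pvCountAdj : List Char → Int
  | [] => 0
  | [_] => 0
  | a :: b :: t => (if a ≠ b then 1 else 0) + pvCountAdj (b :: t)

theorem pvFirstUpper_snd_nonneg (cs : List Char) (i : Int) (h : 0 ≤ i) :
    0 ≤ (pvFirstUpper cs i).2 := by
  induction cs generalizing i with
  | nil => simpa [pvFirstUpper]
  | cons c cs ih =>
    simp only [pvFirstUpper]
    split
    · simpa
    · exact ih (i + 1) (by omega)

theorem pvFirstUpper_shift (cs : List Char) (i : Int) :
    pvFirstUpper cs i = ((pvFirstUpper cs 0).1, i + (pvFirstUpper cs 0).2) := by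
  induction cs generalizing i with
  | nil => simp [pvFirstUpper]
  | cons c cs ih =>
    simp only [pvFirstUpper]
    split
    · simp
    · rw [ih (i + 1), ih (0 + 1)]
      simp only [Prod.mk.injEq, true_and]
      omega

theorem pvFoldA_acc (l : List Char) (lc : Option Char) (ch : Int) :
    (l.foldl pvStepA (lc, ch)).2 = ch + (l.foldl pvStepA (lc, 0)).2 := by
  induction l generalizing lc ch with
  | nil => simp
  | cons c t ih =>
    simp only [List.foldl_cons, pvStepA]
    split
    · rw [ih _ (ch + 1), ih _ (0 + 1)]; omega
    · exact ih lc ch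

theorem pvFoldA_eq_countAdj (l : List Char) (c : Char) :
    (l.foldl pvStepA (some c, 0)).2
      = pvCountAdj (c :: l.filter (fun d => PySem.Chars.isupper d)) := by
  induction l generalizing c with
  | nil => simp [pvCountAdj]
  | cons d t ih =>
    simp only [List.foldl_cons, pvStepA, List.filter_cons]
    by_cases hu : PySem.Chars.isupper d = true
    · by_cases hne : d = c
      · subst hne
        simp only [hu, if_pos]
        rw [if_neg (by simp)]
        rw [ih d]
        simp [pvCountAdj]
      · rw [if_pos ⟨hu, by simpa using (Ne.symm hne)⟩]
        simp only [hu, if_pos]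
        rw [pvFoldA_acc, ih d]
        simp only [pvCountAdj]
        rw [if_pos (Ne.symm hne)]
        ring
    · rw [if_neg (by tauto)]
      simp only [hu]
      rw [ih c]
      simp

theorem pvZip_eq_countAdj (l : List Char) :
    (l.zip (l.drop 1)).foldl (fun acc p => if p.1 ≠ p.2 then acc + 1 else acc) 0
      = pvCountAdj l := by
  induction l with
  | nil => simp [pvCountAdj]
  | cons a t ih =>
    cases t with
    | nil => simp [pvCountAdj]
    | cons b t' =>
      simp only [List.drop_succ_cons, List.drop_zero, List.zip_cons_cons, List.foldl_cons]
      have hacc : ∀ (l2 : List (Char × Char)) (m : Int),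
          l2.foldl (fun acc p => if p.1 ≠ p.2 then acc + 1 else acc) m
            = m + l2.foldl (fun acc p => if p.1 ≠ p.2 then acc + 1 else acc) 0 := by
        intro l2
        induction l2 with
        | nil => simp
        | cons p t2 ih2 =>
          intro m
          simp only [List.foldl_cons]
          split
          · rw [ih2 (m + 1), ih2 (0 + 1)]; omega
          · exact ih2 m
      rw [hacc]
      simp only [pvCountAdj] at *
      rw [← ih]
      simp only [List.drop_succ_cons, List.drop_zero]
      split <;> omega

theorem pv_main (cs : List Char) :
    ((PySem.List.pyRange ((pvFirstUpper cs 0).2 + 1) (cs.length : Int) 1).foldl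
        (fun st j => pvStepA st (PySem.List.pyGetD cs j ' ')) ((pvFirstUpper cs 0).1, 0)).2
      = pvCountAdj (cs.filter (fun d => PySem.Chars.isupper d)) := by
  induction cs with
  | nil => simp [pvFirstUpper, PySem.List.pyRange_one_eq_nil, pvCountAdj]
  | cons c t ih =>
    by_cases hu : PySem.Chars.isupper c = true
    · -- first loop stops at index 0; second loop runs over t
      have hfu : pvFirstUpper (c :: t) 0 = (some c, 0) := by simp [pvFirstUpper, hu]
      rw [hfu]
      rw [PySem.List.foldl_pyRange_pyGetD' (c :: t) ' '
            (fun st d => pvStepA st d) (some c, 0) (by norm_num)]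
      simp only [show ((0 : Int) + 1).toNat = 1 from rfl, List.drop_succ_cons, List.drop_zero]
      rw [pvFoldA_eq_countAdj]
      simp [hu]
    · -- head skipped: index shifts by one
      have hnn : 0 ≤ (pvFirstUpper t 0).2 := pvFirstUpper_snd_nonneg t 0 le_rfl
      have hfu : pvFirstUpper (c :: t) 0
          = ((pvFirstUpper t 0).1, 1 + (pvFirstUpper t 0).2) := by
        rw [show pvFirstUpper (c :: t) 0 = pvFirstUpper t 1 from by
          simp [pvFirstUpper, hu]]
        exact pvFirstUpper_shift t 1
      rw [hfu]
      rw [PySem.List.foldl_pyRange_pyGetD' (c :: t) ' '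
            (fun st d => pvStepA st d) _ (by omega)]
      have hdrop : (1 + (pvFirstUpper t 0).2 + 1).toNat = ((pvFirstUpper t 0).2 + 1).toNat + 1 := by
        omega
      rw [hdrop, List.drop_succ_cons]
      rw [← PySem.List.foldl_pyRange_pyGetD' t ' '
            (fun st d => pvStepA st d) _ (by omega)]
      rw [ih]
      simp [hu]

-- ===== VERDICT (by name: the statement is the Claim_ definition above) =====
theorem ranking_2_spec : Claim_equal_ranking_2 := by
  intro sol _
  unfold Spec_ranking_2 ranking_2 ranking_2_alt
  simp only []
  rw [pvZip_eq_countAdj, pv_main]
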